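-- pv_equiv track=rewrite | github.com/asweigart/programmedpatterns | book/visualpatterns.py | pattern83
-- ===== SOURCE A (Python) =====
-- def pattern83(step):
--     pattern = 'O\n'
--     rowWidth = 1
--     for i in range(2, step + 1):
--         pattern += ('O' * rowWidth) + '\n'
--         if rowWidth % 2 == 1:
--             rowWidth += 1
--     return pattern
-- ===== SOURCE B (Python) =====
-- def pattern83(step):
--     if step < 2:
--         return 'O\n'
--     return 'O\nO\n' + 'OO\n' * (step - 2)
-- ===== Notes on version B (the rewrite author's own statement) =====
-- stated objective: simpler
-- what changed: Replaced the per-row loop and conditional width update with a closed form: the row width stabilises at two after the first iteration, so the result is a fixed prefix plus a repeated 'OO' row built by string multiplication.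
import Mathlib
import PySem

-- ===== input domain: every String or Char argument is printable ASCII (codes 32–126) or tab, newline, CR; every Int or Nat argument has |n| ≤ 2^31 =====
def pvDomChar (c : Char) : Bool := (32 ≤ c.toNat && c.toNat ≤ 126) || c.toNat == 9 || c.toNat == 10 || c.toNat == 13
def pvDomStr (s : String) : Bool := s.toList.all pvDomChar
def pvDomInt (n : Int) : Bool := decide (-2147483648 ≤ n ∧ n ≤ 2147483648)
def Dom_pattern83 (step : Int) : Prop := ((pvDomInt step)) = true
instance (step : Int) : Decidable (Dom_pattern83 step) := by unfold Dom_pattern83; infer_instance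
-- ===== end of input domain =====

-- B replaces A's per-row loop with a closed form (fixed prefix + repeated "OO" row); equivalence proved for all step.

-- ===== PORT A =====
-- loop body: pattern += 'O'*rowWidth + '\n'; if rowWidth % 2 == 1: rowWidth += 1
-- rowWidth is never negative, so List.replicate matches Python's 'O'*rowWidth exactly
def p83step (st : String × Int) (_ : Int) : String × Int :=
  let pattern := st.1 ++ String.mk (List.replicate st.2.toNat 'O') ++ "\n"
  let rowWidth := if st.2 % 2 == 1 then st.2 + 1 else st.2
  (pattern, rowWidth)

def pattern83 (step : Int) : String :=
  ((PySem.List.pyRange 2 (step + 1) 1).foldl p83step ("O\n", 1)).1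

-- ===== PORT B =====
-- closed form: 'OO\n' * (step - 2) as String.join of replicate (step ≥ 2 here, so toNat is exact)
def pattern83_alt (step : Int) : String :=
  if step < 2 then "O\n"
  else "O\nO\n" ++ String.join (List.replicate (step - 2).toNat "OO\n")

-- ===== PRECONDITION & SPEC =====
def Spec_pattern83 (step : Int) (out : String) : Prop := out = pattern83_alt step
instance (step : Int) (out : String) : Decidable (Spec_pattern83 step out) := by unfold Spec_pattern83; infer_instance

-- ===== CLAIM (what is proved, stated in full; the proofs are below) =====
def Claim_equal_pattern83 : Prop := ∀ (step : Int), Dom_pattern83 step → Spec_pattern83 step (pattern83 step)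

-- ===== LEMMAS AND PROOFS =====

theorem str_foldl_shift (l : List String) (a b : String) :
    l.foldl (· ++ ·) (a ++ b) = a ++ l.foldl (· ++ ·) b := by
  induction l generalizing b with
  | nil => rfl
  | cons x t ih => simp only [List.foldl_cons, String.append_assoc, ih]

theorem str_join_cons (x : String) (l : List String) :
    String.join (x :: l) = x ++ String.join l := by
  simp only [String.join, List.foldl_cons]
  rw [show ("" : String) ++ x = x ++ "" by simp]
  exact str_foldl_shift l x ""

-- once rowWidth = 2, every iteration appends "OO\n" and keeps the width
theorem pattern83_loop_two (l : List Int) (p : String) :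
    l.foldl p83step (p, 2)
      = (p ++ String.join (List.replicate l.length "OO\n"), 2) := by
  induction l generalizing p with
  | nil => simp [String.join]
  | cons a t ih =>
      rw [List.foldl_cons]
      have hOO : String.mk ['O', 'O'] ++ "\n" = "OO\n" := by decide
      have hst : p83step (p, 2) a = (p ++ "OO\n", 2) := by
        simp [p83step, String.append_assoc, hOO]
      rw [hst, ih]
      rw [List.length_cons, List.replicate_succ, str_join_cons, String.append_assoc]

theorem pattern83_eq (step : Int) : pattern83 step = pattern83_alt step := by
  unfold pattern83 pattern83_alt
  by_cases h : step < 2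
  · rw [PySem.List.pyRange_one_eq_nil (by omega)]
    simp [h]
  · rw [PySem.List.pyRange_one_cons (by omega)]
    rw [List.foldl_cons]
    have hst : p83step ("O\n", 1) 2 = ("O\nO\n", 2) := by decide
    rw [hst, pattern83_loop_two, PySem.List.length_pyRange_one]
    have hlen : (step + 1 - (2 + 1)).toNat = (step - 2).toNat := by omega
    rw [hlen, if_neg h]

-- ===== VERDICT (by name: the statement is the Claim_ definition above) =====
theorem pattern83_spec : Claim_equal_pattern83 := by
  intro step _
  unfold Spec_pattern83
  exact pattern83_eq step
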